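-- pv_equiv track=rewrite | github.com/pro465/research | magic_sos.py | sqs
-- ===== SOURCE A (Python) =====
-- def sqs(mod):
--     squares=[(2*s*s)%mod for s in range(mod)]
--     res=[]
--     for s in range(mod):
--         sq=(2*s*s)%mod
--         res.append([])
--         for i in range(mod):
--             for j in range(i):
--                 if (i*i + j*j)%mod == sq:
--                     res[-1].append((i, j))
--     return res
-- ===== SOURCE B (Python) =====
-- def sqs(mod):
--     buckets = {}
--     for i in range(mod):
--         for j in range(i):
--             buckets.setdefault((i*i + j*j) % mod, []).append((i, j))
--     return [list(buckets.get((2*s*s) % mod, [])) for s in range(mod)]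
-- ===== Notes on version B (the rewrite author's own statement) =====
-- stated objective: faster
-- what changed: B groups the pairs (i,j), j<i, once into a dict keyed by (i*i+j*j) % mod and then looks up 2*s*s % mod per row, instead of rescanning all pairs for every s.
import Mathlib
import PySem

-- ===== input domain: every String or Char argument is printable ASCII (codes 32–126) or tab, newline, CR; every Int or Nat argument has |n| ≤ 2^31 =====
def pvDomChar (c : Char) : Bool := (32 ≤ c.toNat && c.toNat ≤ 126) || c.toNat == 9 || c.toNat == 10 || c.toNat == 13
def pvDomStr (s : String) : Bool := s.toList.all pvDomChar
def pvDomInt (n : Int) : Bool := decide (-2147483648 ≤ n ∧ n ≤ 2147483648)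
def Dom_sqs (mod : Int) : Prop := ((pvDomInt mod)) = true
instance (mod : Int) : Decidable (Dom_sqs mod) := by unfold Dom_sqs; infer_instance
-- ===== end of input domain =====

-- B groups all pairs (i,j), j<i, into a dict keyed by (i*i+j*j) % mod once and looks up 2*s*s % mod per row (faster: one pass over pairs instead of one per residue).


-- ===== PORT A =====
-- literal transliteration: the unused 'squares' list is kept, the row for each s is
-- built by the double loop over i and j < i, appending on a match.
def sqs (mod : Int) : List (List (Int × Int)) :=
  let _squares := (PySem.List.pyRange 0 mod 1).map (fun s => PySem.Int.mod (2*s*s) mod)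
  (PySem.List.pyRange 0 mod 1).foldl (fun res s =>
    let sq := PySem.Int.mod (2*s*s) mod
    res ++ [(PySem.List.pyRange 0 mod 1).foldl (fun row i =>
      (PySem.List.pyRange 0 i 1).foldl (fun row j =>
        if PySem.Int.mod (i*i + j*j) mod = sq then row ++ [(i, j)] else row) row) []]) []

-- ===== PORT B =====
-- buckets = {}; setdefault((i*i+j*j)%mod, []).append((i,j)) is Dict.modify key [] (· ++ [(i,j)]);
-- the comprehension's list(...) copy is the identity on Lean lists.
def sqs_alt (mod : Int) : List (List (Int × Int)) :=
  let buckets : PySem.Dict Int (List (Int × Int)) :=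
    (PySem.List.pyRange 0 mod 1).foldl (fun d i =>
      (PySem.List.pyRange 0 i 1).foldl (fun d j =>
        d.modify (PySem.Int.mod (i*i + j*j) mod) [] (· ++ [(i, j)])) d) PySem.Dict.empty
  (PySem.List.pyRange 0 mod 1).map (fun s => buckets.getD (PySem.Int.mod (2*s*s) mod) [])

-- ===== PRECONDITION & SPEC =====
def Spec_sqs (mod : Int) (out : List (List (Int × Int))) : Prop := out = sqs_alt mod
instance (mod : Int) (out : List (List (Int × Int))) : Decidable (Spec_sqs mod out) := by unfold Spec_sqs; infer_instance

-- ===== CLAIM (what is proved, stated in full; the proofs are below) =====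
def Claim_equal_sqs : Prop := ∀ (mod : Int), Dom_sqs mod → Spec_sqs mod (sqs mod)

-- ===== LEMMAS AND PROOFS =====

-- the flattened list of pairs both versions traverse
def sqsPairs (mod : Int) : List (Int × Int) :=
  (PySem.List.pyRange 0 mod 1).flatMap (fun i => (PySem.List.pyRange 0 i 1).map (fun j => (i, j)))

-- a nested fold over i and j < i is a single fold over the flattened pair list
theorem nested_foldl_eq_pairs {γ : Type} (L : List Int) (f : Int → List Int)
    (g : γ → Int × Int → γ) (c : γ) :
    L.foldl (fun c i => (f i).foldl (fun c j => g c (i, j)) c) c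
      = (L.flatMap (fun i => (f i).map (fun j => (i, j)))).foldl g c := by
  induction L generalizing c with
  | nil => rfl
  | cons a L ih => simp [List.foldl_append, List.foldl_map, ih]

theorem rowA_eq_filter (mod sq : Int) :
    (PySem.List.pyRange 0 mod 1).foldl (fun row i =>
      (PySem.List.pyRange 0 i 1).foldl (fun row j =>
        if PySem.Int.mod (i*i + j*j) mod = sq then row ++ [(i, j)] else row) row) []
    = (sqsPairs mod).filter (fun p => PySem.Int.mod (p.1*p.1 + p.2*p.2) mod = sq) := by
  rw [nested_foldl_eq_pairs (PySem.List.pyRange 0 mod 1) (fun i => PySem.List.pyRange 0 i 1)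
        (fun row p => if PySem.Int.mod (p.1*p.1 + p.2*p.2) mod = sq then row ++ [p] else row) []]
  rw [PySem.List.foldl_append_ite_eq_filter]
  rfl

theorem buckets_getD (mod : Int) (P : List (Int × Int)) (d : PySem.Dict Int (List (Int × Int))) (k : Int) :
    (P.foldl (fun d p => d.modify (PySem.Int.mod (p.1*p.1 + p.2*p.2) mod) [] (· ++ [p])) d).getD k []
      = d.getD k [] ++ P.filter (fun p => PySem.Int.mod (p.1*p.1 + p.2*p.2) mod = k) := by
  induction P generalizing d with
  | nil => simp
  | cons p P ih =>
    simp only [List.foldl_cons, ih, List.filter_cons]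
    rw [PySem.Dict.getD_modify]
    by_cases h : k = PySem.Int.mod (p.1*p.1 + p.2*p.2) mod
    · rw [if_pos h]
      simp [h, List.append_assoc]
    · rw [if_neg h]
      simp [show ¬(PySem.Int.mod (p.1*p.1 + p.2*p.2) mod = k) from fun hk => h hk.symm]

-- ===== VERDICT (by name: the statement is the Claim_ definition above) =====
theorem sqs_spec : Claim_equal_sqs := by
  intro mod _
  show sqs mod = sqs_alt mod
  unfold sqs sqs_alt
  rw [PySem.List.foldl_append_singleton_eq_map, List.nil_append]
  refine List.map_congr_left (fun s _ => ?_)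
  rw [rowA_eq_filter]
  have hB : (PySem.List.pyRange 0 mod 1).foldl (fun d i =>
      (PySem.List.pyRange 0 i 1).foldl (fun d j =>
        d.modify (PySem.Int.mod (i*i + j*j) mod) [] (· ++ [(i, j)])) d) PySem.Dict.empty
      = (sqsPairs mod).foldl (fun d p =>
          d.modify (PySem.Int.mod (p.1*p.1 + p.2*p.2) mod) [] (· ++ [p])) PySem.Dict.empty :=
    nested_foldl_eq_pairs (PySem.List.pyRange 0 mod 1) (fun i => PySem.List.pyRange 0 i 1)
      (fun d p => d.modify (PySem.Int.mod (p.1*p.1 + p.2*p.2) mod) [] (· ++ [p])) PySem.Dict.empty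
  rw [hB, buckets_getD mod (sqsPairs mod) PySem.Dict.empty (PySem.Int.mod (2*s*s) mod)]
  simp
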